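-- pv_equiv track=rewrite | github.com/LitaiRenGit/FullTime-coding-test | identicalSubstr.py | identicalSubstr
-- ===== SOURCE A (Python) =====
-- def identicalSubstr(s):
--     def recursive(s):
--         if len(s)==1: return 1
--         res=recursive(s[1:])
--         for ch in s:
--             if ch==s[0]:
--                 res+=1
--             else:
--                 break
--         return res
--     return recursive(s)
-- ===== SOURCE B (Python) =====
-- def identicalSubstr(s):
--     # One pass over maximal runs of equal characters: a run of length L
--     # contributes L*(L+1)//2 (the sum of leading-run lengths of its suffixes).
--     total = 0
--     i = 0
--     n = len(s)
--     while i < n: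
--         j = i + 1
--         while j < n and s[j] == s[i]:
--             j += 1
--         L = j - i
--         total += L * (L + 1) // 2
--         i = j
--     return total
-- ===== Notes on version B (the rewrite author's own statement) =====
-- stated objective: faster
-- what changed: Replaced the per-suffix recursion (each suffix rescans its leading equal run) by a single left-to-right pass over maximal equal-character runs, adding L*(L+1)/2 per run of length L.
import Mathlib
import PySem

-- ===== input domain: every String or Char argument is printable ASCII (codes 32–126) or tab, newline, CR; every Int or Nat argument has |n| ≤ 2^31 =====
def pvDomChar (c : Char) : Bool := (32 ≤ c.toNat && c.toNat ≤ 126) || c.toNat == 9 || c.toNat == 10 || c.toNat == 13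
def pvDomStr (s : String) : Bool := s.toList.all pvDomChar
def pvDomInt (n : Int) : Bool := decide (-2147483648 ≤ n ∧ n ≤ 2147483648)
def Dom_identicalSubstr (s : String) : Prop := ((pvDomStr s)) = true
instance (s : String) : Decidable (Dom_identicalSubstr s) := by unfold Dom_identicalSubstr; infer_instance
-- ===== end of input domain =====

-- B replaces A's per-suffix recursion by one pass over maximal equal-char runs (L*(L+1)/2 per run): asymptotically faster.

-- ===== PORT A =====
-- A's inner `recursive`: base case len==1, else recurse on s[1:] and add the
-- length of the leading run of s[0] (the for/break loop = takeWhile (· == s[0])).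
-- The [] case is unreachable under Pre_ (Python recurses forever on "").
def pvRecA : List Char → Int
  | [] => 0
  | c :: cs =>
    if cs.length = 0 then 1
    else pvRecA cs + (((c :: cs).takeWhile (· == c)).length : Int)

def identicalSubstr (s : String) : Int := pvRecA s.toList

-- ===== PORT B =====
-- Source B's while loop: consume the maximal run at the front, add L*(L+1)//2
-- (all values nonnegative, so Nat arithmetic is exact here), repeat on the rest.
def pvRuns : List Char → Int
  | [] => 0
  | c :: cs =>
    let run := cs.takeWhile (· == c)
    let rest := cs.dropWhile (· == c)
    let L : Nat := 1 + run.length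
    ((L * (L + 1) / 2 : Nat) : Int) + pvRuns rest
termination_by l => l.length
decreasing_by
  simp only [List.length_cons]
  exact Nat.lt_succ_of_le (List.length_dropWhile_le _ _)

def identicalSubstr_alt (s : String) : Int := pvRuns s.toList

-- ===== PRECONDITION & SPEC =====
-- A raises RecursionError on the empty string (the recursion never reaches the len==1 base case).
def Pre_identicalSubstr (s : String) : Prop := s ≠ ""
instance (s : String) : Decidable (Pre_identicalSubstr s) := by unfold Pre_identicalSubstr; infer_instance
def pvWitness_identicalSubstr : String := "aab"

def Spec_identicalSubstr (s : String) (out : Int) : Prop := out = identicalSubstr_alt s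
instance (s : String) (out : Int) : Decidable (Spec_identicalSubstr s out) := by unfold Spec_identicalSubstr; infer_instance

-- ===== CLAIM (what is proved, stated in full; the proofs are below) =====
def Claim_equal_identicalSubstr : Prop := ∀ (s : String), Dom_identicalSubstr s → Pre_identicalSubstr s → Spec_identicalSubstr s (identicalSubstr s)

-- ===== LEMMAS AND PROOFS =====

-- A's recursion, uncurled: on any nonempty list it is "leading run + value on the tail".
theorem pvRecA_cons (c : Char) (cs : List Char) :
    pvRecA (c :: cs) = pvRecA cs + (1 + ((cs.takeWhile (· == c)).length : Int)) := by
  cases cs with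
  | nil => simp [pvRecA]
  | cons d ds =>
    simp [pvRecA, List.takeWhile_cons]
    ring

theorem takeWhile_eq_replicate (c : Char) (l : List Char) :
    l.takeWhile (· == c) = List.replicate (l.takeWhile (· == c)).length c := by
  induction l with
  | nil => simp
  | cons d ds ih =>
    by_cases h : d = c
    · subst h
      simpa [List.takeWhile_cons, List.replicate_succ] using ih
    · have hb : (d == c) = false := by simp [h]
      simp [List.takeWhile, hb]

theorem takeWhile_dropWhile_nil (c : Char) (l : List Char) :
    (l.dropWhile (· == c)).takeWhile (· == c) = [] := by
  induction l with
  | nil => simp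
  | cons d ds ih =>
    by_cases h : d = c
    · subst h; simpa [List.dropWhile] using ih
    · have hb : (d == c) = false := by simp [h]
      simp [List.dropWhile, hb]

-- Peeling a block of k copies of c off the front adds 1+2+...+k to A's value,
-- provided the remainder does not start with c.
theorem pvRecA_replicate (c : Char) (k : Nat) (rest : List Char)
    (h : rest.takeWhile (· == c) = []) :
    pvRecA (List.replicate k c ++ rest) = pvRecA rest + ((k * (k + 1) / 2 : Nat) : Int) := by
  induction k with
  | zero => simp
  | succ k ih =>
    have htw : ((List.replicate k c ++ rest).takeWhile (· == c)) = List.replicate k c := by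
      rw [List.takeWhile_append]
      split_ifs with hall
      · simp [h]
      · exfalso; exact hall (by simp)
    rw [List.replicate_succ, List.cons_append, pvRecA_cons, htw, ih]
    simp only [List.length_replicate]
    obtain ⟨m, hm⟩ := Nat.even_mul_succ_self k
    have e1 : (k + 1) * (k + 1 + 1) = k * (k + 1) + 2 * (k + 1) := by ring
    generalize pvRecA rest = r
    omega

theorem pvRuns_cons (c : Char) (cs : List Char) :
    pvRuns (c :: cs) =
      ((((1 + (cs.takeWhile (· == c)).length) * (1 + (cs.takeWhile (· == c)).length + 1) / 2 : Nat)) : Int)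
        + pvRuns (cs.dropWhile (· == c)) := by
  rw [pvRuns]

theorem pvRecA_eq_pvRuns (l : List Char) : pvRecA l = pvRuns l := by
  match l with
  | [] => simp [pvRecA, pvRuns]
  | c :: cs =>
    have ih := pvRecA_eq_pvRuns (cs.dropWhile (· == c))
    have hrepl := takeWhile_eq_replicate c cs
    have hsplit : c :: cs = List.replicate (1 + (cs.takeWhile (· == c)).length) c
        ++ cs.dropWhile (· == c) := by
      rw [Nat.add_comm, List.replicate_succ, ← hrepl, List.cons_append,
        List.takeWhile_append_dropWhile]
    rw [pvRuns_cons]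
    conv_lhs => rw [hsplit]
    rw [pvRecA_replicate c _ _ (takeWhile_dropWhile_nil c cs), ih]
    ring
termination_by l.length
decreasing_by
  simp only [List.length_cons]
  exact Nat.lt_succ_of_le (List.length_dropWhile_le _ _)

-- ===== VERDICT (by name: the statement is the Claim_ definition above) =====
theorem identicalSubstr_spec : Claim_equal_identicalSubstr := by
  intro s _ _
  unfold Spec_identicalSubstr identicalSubstr identicalSubstr_alt
  exact pvRecA_eq_pvRuns s.toList
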